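-- pv_equiv track=rewrite | github.com/larynx95/rosalind | src/ba04/ba04c_cspectrum/ba04c.py | cyclo_subpeptides
-- ===== SOURCE A (Python) =====
-- def cyclo_subpeptides(peptide):
--     """
--     string -> [string]
--     get all cyclic subpeptides from peptide
--     complex for-loops (not easy, use pencil and paper)
--     >>> cyclo_subpeptides('NQEL')
--         ['','N','Q','E','L','NQ','QE','EL','LN','NQE','QEL','ELN','LNQ','NQEL']
--     """
--     ls = ['']
--     n = len(peptide)
--     for aacid in peptide:
--         ls.append(aacid)
--     for i in range(len(peptide)-2):
--         temp = []
--         for j in range(len(peptide)):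
--             combined = ls[-n+j] + peptide[(i+j+1)%n]
--             temp.append(combined)
--         ls.extend(temp)
--     ls.append(peptide)
--     return ls
-- ===== SOURCE B (Python) =====
-- def cyclo_subpeptides(peptide):
--     n = len(peptide)
--     doubled = peptide + peptide
--     res = [''] + list(peptide)
--     for L in range(2, n):
--         res += [doubled[i:i + L] for i in range(n)]
--     res.append(peptide)
--     return res
-- ===== Notes on version B (the rewrite author's own statement) =====
-- stated objective: simpler
-- what changed: B slices each cyclic subpeptide independently out of the doubled string peptide+peptide (doubled[i:i+L] per length and start), replacing A's accumulator construction that rebuilds each length-L piece by fetching the stored length-(L-1) piece via the negative index ls[-n+j] and appending one modularly-indexed character.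
import Mathlib
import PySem

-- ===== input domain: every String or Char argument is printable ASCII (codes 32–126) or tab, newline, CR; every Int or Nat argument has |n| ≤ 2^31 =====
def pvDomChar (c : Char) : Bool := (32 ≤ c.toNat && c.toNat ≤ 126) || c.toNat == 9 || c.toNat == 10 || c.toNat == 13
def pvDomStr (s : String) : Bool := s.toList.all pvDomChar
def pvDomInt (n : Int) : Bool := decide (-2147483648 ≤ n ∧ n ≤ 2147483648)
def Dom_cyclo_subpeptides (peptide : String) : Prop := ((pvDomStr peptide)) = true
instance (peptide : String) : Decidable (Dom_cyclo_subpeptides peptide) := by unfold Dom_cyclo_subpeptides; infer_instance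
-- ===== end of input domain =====

-- B replaces A's accumulator construction (extending each stored length-(L-1) substring by one
-- modularly-indexed character) by slicing each cyclic subpeptide independently out of the doubled
-- string peptide+peptide; objective: simpler.

-- ===== PORT A =====
-- A is ported over the string's character list (PySem.Chars convention: strings as List Char);
-- the resulting list of char-lists is turned into Strings at the end.
-- Python's ls[-n+j] and peptide[...] are always in range where A evaluates them, so pyGetD's
-- default is never used (A raises on no input).
def cycloA_core (cs : List Char) : List (List Char) :=
  let n : Int := (cs.length : Int)
  let ls0 : List (List Char) := cs.foldl (fun ls c => ls ++ [[c]]) [[]]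
  let ls1 : List (List Char) :=
    (PySem.List.pyRange 0 (n - 2)).foldl (fun ls i =>
      ls ++ (PySem.List.pyRange 0 n).foldl (fun temp j =>
        temp ++ [PySem.List.pyGetD ls (-n + j) [] ++
                 [PySem.List.pyGetD cs (PySem.Int.mod (i + j + 1) n) ' ']]) []) ls0
  ls1 ++ [cs]

def cyclo_subpeptides (peptide : String) : List String :=
  (cycloA_core peptide.toList).map (fun l => String.ofList l)

-- ===== PORT B =====
def cycloB_core (cs : List Char) : List (List Char) :=
  let n : Int := (cs.length : Int)
  let doubled : List Char := cs ++ cs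
  let res0 : List (List Char) := [[]] ++ cs.map (fun c => [c])
  let res1 : List (List Char) :=
    (PySem.List.pyRange 2 n).foldl (fun res L =>
      res ++ (PySem.List.pyRange 0 n).map (fun i =>
        PySem.List.slice doubled (some i) (some (i + L)))) res0
  res1 ++ [cs]

def cyclo_subpeptides_alt (peptide : String) : List String :=
  (cycloB_core peptide.toList).map (fun l => String.ofList l)

-- ===== PRECONDITION & SPEC =====
def Spec_cyclo_subpeptides (peptide : String) (out : List String) : Prop := out = cyclo_subpeptides_alt peptide
instance (peptide : String) (out : List String) : Decidable (Spec_cyclo_subpeptides peptide out) := by unfold Spec_cyclo_subpeptides; infer_instance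

-- ===== CLAIM (what is proved, stated in full; the proofs are below) =====
def Claim_equal_cyclo_subpeptides : Prop := ∀ (peptide : String), Dom_cyclo_subpeptides peptide → Spec_cyclo_subpeptides peptide (cyclo_subpeptides peptide)

-- ===== LEMMAS AND PROOFS =====

-- the cyclic subpeptide of length L starting at position j, cut from the doubled list
def pvSub (cs : List Char) (j L : Nat) : List Char := ((cs ++ cs).drop j).take L

-- the row of all length-L cyclic subpeptides
def pvRow (cs : List Char) (L : Nat) : List (List Char) := (List.range cs.length).map (fun j => pvSub cs j L)

lemma pvRow_one0 (cs : List Char) : pvRow cs 1 = cs.map (fun c => [c]) := by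
  apply List.ext_getElem (by simp [pvRow])
  intro i h1 h2
  simp only [pvRow, pvSub, List.getElem_map, List.getElem_range]
  have hi : i < cs.length := by simpa [pvRow] using h1
  have hD : i < (cs ++ cs).length := by simp; omega
  rw [List.drop_eq_getElem_cons hD]
  simp [List.getElem_append_left hi]

-- rows of lengths 1..k, concatenated
def pvMid1 (cs : List Char) (k : Nat) : List (List Char) := (List.range' 1 k).flatMap (fun L => pvRow cs L)

lemma pvMid1_succ (cs : List Char) (k : Nat) :
    pvMid1 cs (k + 1) = pvMid1 cs k ++ pvRow cs (k + 1) := by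
  simp [pvMid1, List.range'_concat, Nat.add_comm]

lemma pvRow_length (cs : List Char) (L : Nat) : (pvRow cs L).length = cs.length := by simp [pvRow]

lemma pvMid1_length (cs : List Char) (k : Nat) : (pvMid1 cs k).length = k * cs.length := by
  induction k with
  | zero => simp [pvMid1]
  | succ k ih => simp [pvMid1_succ, ih, pvRow_length]; ring

-- extending a length-L cyclic piece by the next character modulo n, as A's inner loop does
lemma pvSub_step (cs : List Char) (j L : Nat) (hj : j < cs.length) (hL : L < cs.length) :
    pvSub cs j L ++ [cs.getD ((j + L) % cs.length) ' '] = pvSub cs j (L + 1) := by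
  have hm : (j + L) % cs.length < cs.length := Nat.mod_lt _ (by omega)
  have hD : j + L < (cs ++ cs).length := by simp; omega
  have hgd : cs.getD ((j + L) % cs.length) ' ' = cs[(j + L) % cs.length] :=
    List.getD_eq_getElem cs ' ' hm
  have hdrop : ((cs ++ cs).drop j)[L]? = some ((cs ++ cs)[j + L]) := by
    rw [List.getElem?_drop]
    exact List.getElem?_eq_getElem hD
  have hval : (cs ++ cs)[j + L] = cs[(j + L) % cs.length] := by
    by_cases hlt : j + L < cs.length
    · rw [List.getElem_append_left hlt]
      congr 1
      exact (Nat.mod_eq_of_lt hlt).symm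
    · rw [List.getElem_append_right (by omega)]
      congr 1
      rw [Nat.mod_eq_sub_mod (by omega), Nat.mod_eq_of_lt (by omega)]
  unfold pvSub
  rw [List.take_add_one, hdrop, hgd, hval]
  simp

-- reading the previous row back out of the accumulator, as A's ls[-n+j] does
lemma pvGet_prev (cs : List Char) (k j : Nat) (hj : j < cs.length) :
    PySem.List.pyGetD ([] :: pvMid1 cs (k + 1)) (-(cs.length : Int) + (j : Int)) [] = pvSub cs j (k + 1) := by
  have hidx : (-(cs.length : Int) + (j : Int)) = -(((cs.length - j : Nat)) : Int) := by omega
  have hlen : ([] :: pvMid1 cs (k + 1)).length = (k + 1) * cs.length + 1 := by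
    simp [pvMid1_length]
  have hexp : (k + 1) * cs.length = k * cs.length + cs.length := by ring
  rw [hidx, PySem.List.pyGetD_neg_natCast _ _ _ (by omega) (by omega)]
  have hidx2 : ([] :: pvMid1 cs (k + 1)).length - (cs.length - j) = k * cs.length + j + 1 := by
    omega
  simp only [hidx2, List.getElem_cons_succ]
  rw [List.getElem_eq_iff]
  rw [pvMid1_succ, List.getElem?_append_right (by rw [pvMid1_length]; omega)]
  simp [pvMid1_length, pvRow, hj]

lemma pyRange_natCast' : ∀ (d a b : Nat), b - a = d →
    PySem.List.pyRange (a : Int) (b : Int) = (List.range' a d).map Int.ofNat := by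
  intro d
  induction d with
  | zero =>
    intro a b h
    have hlen : (PySem.List.pyRange (a : Int) (b : Int)).length = 0 := by
      rw [PySem.List.length_pyRange_one]; omega
    simpa using List.eq_nil_of_length_eq_zero hlen
  | succ d ih =>
    intro a b h
    have hab : (a : Int) < (b : Int) := by exact_mod_cast (by omega : a < b)
    rw [PySem.List.pyRange_one_cons hab]
    have h1 : ((a : Int) + 1) = ((a + 1 : Nat) : Int) := by push_cast; ring
    rw [h1, ih (a+1) b (by omega)]
    simp [List.range'_succ]

lemma mod_natCast (a b : Nat) (hb : 0 < b) :
    PySem.Int.mod (a : Int) (b : Int) = ((a % b : Nat) : Int) := by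
  have h : (0:Int) ≤ (b:Int) := by positivity
  simp [PySem.Int.mod, Int.fmod_eq_emod, h]

lemma pyRange_zero_natCast' (n : Nat) :
    PySem.List.pyRange 0 (n : Int) = (List.range n).map Int.ofNat := by
  rw [PySem.List.pyRange_zero_natCast]; rfl

-- invariant of A's outer loop: after k iterations the accumulator holds '' and the rows of lengths 1..k+1
lemma A_outer (cs : List Char) : ∀ (k : Nat), k ≤ cs.length - 2 →
    List.foldl (fun ls i =>
      ls ++ (PySem.List.pyRange 0 (cs.length : Int)).foldl (fun temp j =>
        temp ++ [PySem.List.pyGetD ls (-(cs.length : Int) + j) [] ++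
                 [PySem.List.pyGetD cs (PySem.Int.mod (i + j + 1) (cs.length : Int)) ' ']]) [])
      ([] :: pvMid1 cs 1) ((List.range k).map Int.ofNat)
    = [] :: pvMid1 cs (k + 1) := by
  intro k
  induction k with
  | zero => intro _; simp
  | succ k ih =>
    intro hk
    rw [List.range_succ, List.map_append, List.foldl_append, ih (by omega)]
    simp only [List.map_cons, List.map_nil, List.foldl_cons, List.foldl_nil]
    rw [PySem.List.foldl_append_singleton_eq_map]
    rw [pyRange_zero_natCast']
    have hrow : ((List.range cs.length).map Int.ofNat).map
        (fun j => PySem.List.pyGetD ([] :: pvMid1 cs (k + 1)) (-(cs.length : Int) + j) [] ++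
          [PySem.List.pyGetD cs (PySem.Int.mod (Int.ofNat k + j + 1) (cs.length : Int)) ' ']) =
        pvRow cs (k + 2) := by
      rw [List.map_map]
      unfold pvRow
      apply List.map_congr_left
      intro j hjmem
      have hj : j < cs.length := List.mem_range.mp hjmem
      simp only [Function.comp_apply]
      rw [show Int.ofNat j = ((j : Nat) : Int) from rfl, show Int.ofNat k = ((k : Nat) : Int) from rfl]
      rw [pvGet_prev cs k j hj]
      have hcast : ((k : Int) + (j : Int) + 1) = ((k + j + 1 : Nat) : Int) := by push_cast; ring
      rw [hcast, mod_natCast _ _ (by omega), PySem.List.pyGetD_natCast]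
      have harg : (k + j + 1) % cs.length = (j + (k + 1)) % cs.length := by ring_nf
      rw [harg]
      exact pvSub_step cs j (k + 1) hj (by omega)
    rw [hrow, List.nil_append, List.cons_append]
    rw [← pvMid1_succ]

lemma pyRange_A (n : Nat) :
    PySem.List.pyRange 0 ((n : Int) - 2) = (List.range (n - 2)).map Int.ofNat := by
  rcases Nat.lt_or_ge n 2 with h | h
  · have hlen : (PySem.List.pyRange 0 ((n : Int) - 2)).length = 0 := by
      rw [PySem.List.length_pyRange_one]; omega
    have h2 : n - 2 = 0 := by omega
    simp [List.eq_nil_of_length_eq_zero hlen, h2]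
  · have h2 : ((n : Int) - 2) = ((n - 2 : Nat) : Int) := by omega
    rw [h2, pyRange_zero_natCast']

lemma ls0_eq (cs : List Char) :
    cs.foldl (fun ls c => ls ++ [[c]]) [[]] = [] :: pvMid1 cs 1 := by
  rw [PySem.List.foldl_append_singleton_eq_map (fun c => [c]) cs [[]]]
  simp [pvMid1, pvRow_one0]

lemma A_eq (cs : List Char) :
    cycloA_core cs = ([] :: pvMid1 cs ((cs.length - 2) + 1)) ++ [cs] := by
  simp only [cycloA_core]
  rw [ls0_eq, pyRange_A]
  exact congrArg (· ++ [cs]) (A_outer cs (cs.length - 2) le_rfl)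

lemma B_eq (cs : List Char) :
    cycloB_core cs = ([] :: pvMid1 cs ((cs.length - 2) + 1)) ++ [cs] := by
  simp only [cycloB_core]
  have hg : ∀ L : Nat, ((PySem.List.pyRange 0 (cs.length : Int)).map
      (fun i => PySem.List.slice (cs ++ cs) (some i) (some (i + Int.ofNat L)))) = pvRow cs L := by
    intro L
    rw [pyRange_zero_natCast', List.map_map]
    unfold pvRow
    apply List.map_congr_left
    intro j hj
    simp only [Function.comp_apply]
    rw [show Int.ofNat j = ((j : Nat) : Int) from rfl, show Int.ofNat L = ((L : Nat) : Int) from rfl]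
    rw [PySem.List.slice_natCast_add]
    rfl
  rw [show (2 : Int) = ((2 : Nat) : Int) from rfl,
      pyRange_natCast' (cs.length - 2) 2 cs.length rfl]
  rw [PySem.List.foldl_append_eq_flatMap]
  rw [List.flatMap_map]
  have hfun : (fun L : Nat => (PySem.List.pyRange 0 (cs.length : Int)).map
      (fun i => PySem.List.slice (cs ++ cs) (some i) (some (i + Int.ofNat L)))) = pvRow cs :=
    funext hg
  rw [hfun]
  have hmid : pvMid1 cs ((cs.length - 2) + 1) =
      pvMid1 cs 1 ++ (List.range' 2 (cs.length - 2)).flatMap (pvRow cs) := by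
    simp [pvMid1, List.range'_succ]
  rw [hmid]
  simp [pvMid1, pvRow_one0]

lemma core_eq (cs : List Char) : cycloA_core cs = cycloB_core cs := by
  rw [A_eq, B_eq]

-- ===== VERDICT (by name: the statement is the Claim_ definition above) =====
theorem cyclo_subpeptides_spec : Claim_equal_cyclo_subpeptides := by
  intro peptide _
  unfold Spec_cyclo_subpeptides cyclo_subpeptides cyclo_subpeptides_alt
  rw [core_eq]
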